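-- pv_equiv track=rewrite | github.com/web3blind/accessibility-auditor | review_exporter.py | _group_findings_by_file
-- ===== SOURCE A (Python) =====
-- from typing import Any, Dict, List, Optional
--
-- SEVERITY_ORDER = {"critical": 0, "warning": 1, "info": 2}
--
-- def _group_findings_by_file(findings: List[Dict[str, Any]]) -> Dict[str, List[Dict[str, Any]]]:
--     groups: Dict[str, List[Dict[str, Any]]] = {}
--     for item in findings:
--         fp = item.get("file_path") or "(unknown file)"
--         groups.setdefault(fp, []).append(item)
--     # sort files by highest severity first, then by path
--     for fp in groups:
--         groups[fp].sort(key=lambda x: SEVERITY_ORDER.get(x.get("severity"), 99))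
--     sorted_keys = sorted(
--         groups.keys(),
--         key=lambda fp: (
--             min(SEVERITY_ORDER.get(x.get("severity"), 99) for x in groups[fp]),
--             fp,
--         ),
--     )
--     return {k: groups[k] for k in sorted_keys}
-- ===== SOURCE B (Python) =====
-- from typing import Any, Dict, List
--
-- SEVERITY_ORDER = {"critical": 0, "warning": 1, "info": 2}
--
-- def _group_findings_by_file(findings: List[Dict[str, Any]]) -> Dict[str, List[Dict[str, Any]]]:
--     sev = lambda it: SEVERITY_ORDER.get(it.get("severity"), 99)
--     fp_of = lambda it: it.get("file_path") or "(unknown file)"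
--     # pass 1: minimum severity rank per file
--     best: Dict[str, int] = {}
--     for it in findings:
--         fp, s = fp_of(it), sev(it)
--         if fp not in best or s < best[fp]:
--             best[fp] = s
--     # pass 2: ONE global sort by (group rank, file, severity, original position)
--     # lays out the entire output in final order; a single grouping pass then
--     # yields the dict with keys and group members already in that order.
--     out: Dict[str, List[Dict[str, Any]]] = {}
--     for _, it in sorted(enumerate(findings),
--                        key=lambda p: (best[fp_of(p[1])], fp_of(p[1]), sev(p[1]), p[0])):
--         out.setdefault(fp_of(it), []).append(it)
--     return out
-- ===== Notes on version B (the rewrite author's own statement) =====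
-- stated objective: alternative
-- what changed: Replaces group-then-sort-each-group-then-min-per-key with a min-severity-per-file pass plus ONE global sort of the enumerated findings by (group rank, file, severity, position) and a single grouping pass, so the per-group sorts, the per-key min scans and the key sort all disappear into one ordering.
import Mathlib
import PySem

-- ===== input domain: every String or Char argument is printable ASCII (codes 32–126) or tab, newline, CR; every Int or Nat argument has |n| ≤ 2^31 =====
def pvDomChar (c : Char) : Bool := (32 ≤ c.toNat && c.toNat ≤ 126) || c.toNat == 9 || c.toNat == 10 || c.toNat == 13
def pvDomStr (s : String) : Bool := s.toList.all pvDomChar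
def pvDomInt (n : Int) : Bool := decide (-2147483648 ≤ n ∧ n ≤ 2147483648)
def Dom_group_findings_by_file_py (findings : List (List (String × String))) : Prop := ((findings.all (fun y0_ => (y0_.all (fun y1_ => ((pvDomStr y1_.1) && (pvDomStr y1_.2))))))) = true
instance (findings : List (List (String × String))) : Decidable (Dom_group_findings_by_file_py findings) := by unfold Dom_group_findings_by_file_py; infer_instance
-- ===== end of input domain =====

-- B replaces A's group-then-sort-each-group-then-min-per-key pipeline by a min-severity pass plus ONE
-- global sort of the enumerated findings by (group rank, file, severity, position) followed by a single
-- grouping pass: an alternative decomposition with no per-group sorts and no per-key min scans.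

-- ===== PORT A =====
-- SEVERITY_ORDER
def pvSevOrder : PySem.Dict String Int := PySem.Dict.mk [("critical", 0), ("warning", 1), ("info", 2)]

-- SEVERITY_ORDER.get(item.get("severity"), 99)   (the key function both Pythons use, identically)
def pvSev (item : List (String × String)) : Int :=
  match (PySem.Dict.mk item).get? "severity" with
  | some s => pvSevOrder.getD s 99
  | none => 99

-- item.get("file_path") or "(unknown file)"   ('or' falls through on None and on the empty string)
def pvFp (item : List (String × String)) : String :=
  match (PySem.Dict.mk item).get? "file_path" with
  | some s => if s = "" then "(unknown file)" else s
  | none => "(unknown file)"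

-- A's grouping loop: groups.setdefault(fp, []).append(item) over the items
def pvGroupDict (l : List (List (String × String))) : PySem.Dict String (List (List (String × String))) :=
  l.foldl (fun d it => d.modify (pvFp it) [] (fun v => v ++ [it])) PySem.Dict.empty

-- A's 'for fp in groups: groups[fp].sort(key=...)': the groups dict with every value sorted in place
def pvGroups2 (findings : List (List (String × String))) : PySem.Dict String (List (List (String × String))) :=
  PySem.Dict.mk ((pvGroupDict findings).items.map (fun p => (p.1, PySem.List.sorted p.2 pvSev false)))

-- sorted(groups.keys(), key=lambda fp: (min(sev(x) for x in groups[fp]), fp)); then {k: groups[k] for k in sorted_keys}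
def group_findings_by_file_py (findings : List (List (String × String))) : List (String × List (List (String × String))) :=
  (PySem.List.sorted2 (pvGroups2 findings).keys
    (fun c => (PySem.List.min? (((pvGroups2 findings).getD c []).map pvSev) (fun x => x)).getD 99)
    (fun c => c) false).map (fun k => (k, (pvGroups2 findings).getD k []))

-- ===== PORT B =====
-- pass 1 body: if fp not in best or s < best[fp]: best[fp] = s
def pvBestStep (d : PySem.Dict String Int) (it : List (String × String)) : PySem.Dict String Int :=
  match d.get? (pvFp it) with
  | none => d.insert (pvFp it) (pvSev it)
  | some v => if pvSev it < v then d.insert (pvFp it) (pvSev it) else d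

def pvBest (findings : List (List (String × String))) : PySem.Dict String Int :=
  findings.foldl pvBestStep PySem.Dict.empty

-- the 4-tuple sort key (best[fp_of(it)], fp_of(it), sev(it), i); best always holds the key at use,
-- so best[...] is ported as getD with a never-reached default
def pvKey4 (best : PySem.Dict String Int) (p : Int × List (String × String)) :
    Lex (Int × Lex (String × Lex (Int × Int))) :=
  toLex (best.getD (pvFp p.2) 99, toLex (pvFp p.2, toLex (pvSev p.2, p.1)))

-- pass 2: one global sort of enumerate(findings), then out.setdefault(fp_of(it), []).append(it)
def group_findings_by_file_py_alt (findings : List (List (String × String))) : List (String × List (List (String × String))) :=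
  ((PySem.List.sorted (PySem.List.enumerate findings) (pvKey4 (pvBest findings)) false).foldl
      (fun out p => out.modify (pvFp p.2) [] (fun v => v ++ [p.2])) PySem.Dict.empty).items

-- ===== PRECONDITION & SPEC =====
def Spec_group_findings_by_file_py (findings : List (List (String × String))) (out : List (String × List (List (String × String)))) : Prop := out = group_findings_by_file_py_alt findings
instance (findings : List (List (String × String))) (out : List (String × List (List (String × String)))) : Decidable (Spec_group_findings_by_file_py findings out) := by unfold Spec_group_findings_by_file_py; infer_instance

-- ===== CLAIM (what is proved, stated in full; the proofs are below) =====
def Claim_equal_group_findings_by_file_py : Prop := ∀ (findings : List (List (String × String))), Dom_group_findings_by_file_py findings → Spec_group_findings_by_file_py findings (group_findings_by_file_py findings)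

-- ===== LEMMAS AND PROOFS =====

-- insertBy with a <-on-key test keeps the ≤-sortedness of the accumulator
theorem pv_insertBy_pairwise {α κ : Type} [LinearOrder κ] (key : α → κ) (x : α) (ys : List α)
    (h : ys.Pairwise (fun a b => key a ≤ key b)) :
    (PySem.List.insertBy (fun a b => decide (key a < key b)) x ys).Pairwise (fun a b => key a ≤ key b) := by
  induction ys with
  | nil => simp [PySem.List.insertBy]
  | cons y ys ih =>
    rw [List.pairwise_cons] at h
    obtain ⟨hy, ht⟩ := h
    by_cases hlt : key x < key y
    · simp only [PySem.List.insertBy, hlt, decide_true, if_true]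
      refine List.Pairwise.cons ?_ (List.Pairwise.cons hy ht)
      intro z hz
      rcases hz with _ | hz
      · exact le_of_lt hlt
      · exact le_trans (le_of_lt hlt) (hy _ (by assumption))
    · simp only [PySem.List.insertBy, hlt, decide_false]
      refine List.Pairwise.cons ?_ (ih ht)
      intro z hz
      rw [PySem.List.mem_insertBy] at hz
      rcases hz with rfl | hz
      · exact le_of_not_gt hlt
      · exact hy _ hz

-- filtering commutes with a single stable insertion (into a ≤-sorted list)
theorem pv_filter_insertBy {α κ : Type} [LinearOrder κ] (key : α → κ) (p : α → Bool) (x : α) (ys : List α)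
    (h : ys.Pairwise (fun a b => key a ≤ key b)) :
    (PySem.List.insertBy (fun a b => decide (key a < key b)) x ys).filter p =
      if p x then PySem.List.insertBy (fun a b => decide (key a < key b)) x (ys.filter p)
      else ys.filter p := by
  induction ys with
  | nil => by_cases hp : p x <;> simp [PySem.List.insertBy, hp]
  | cons y ys ih =>
    rw [List.pairwise_cons] at h
    obtain ⟨hy, ht⟩ := h
    by_cases hlt : key x < key y
    · simp only [PySem.List.insertBy, hlt, decide_true, if_true]
      by_cases hp : p x
      · by_cases hpy : p y
        · simp [hp, hpy, PySem.List.insertBy, hlt]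
        · simp only [List.filter_cons, hp, hpy, if_pos]
          have hhead : ∀ z ∈ ys.filter p, decide (key x < key z) = true := by
            intro z hz
            have hz' := List.mem_of_mem_filter hz
            simp [lt_of_lt_of_le hlt (hy _ hz')]
          cases hys : ys.filter p with
          | nil => simp [PySem.List.insertBy]
          | cons z zs =>
            have := hhead z (by rw [hys]; exact List.mem_cons_self)
            simp [PySem.List.insertBy, this]
      · by_cases hpy : p y <;> simp [hp, hpy]
    · simp only [PySem.List.insertBy, hlt, decide_false]
      by_cases hpy : p y
      · simp [hpy, PySem.List.insertBy, hlt, ih ht]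
        by_cases hp : p x <;> simp [hp]
      · simp [hpy, ih ht]

theorem pv_filter_foldl_insertBy {α κ : Type} [LinearOrder κ] (key : α → κ) (p : α → Bool) :
    ∀ (l acc : List α), acc.Pairwise (fun a b => key a ≤ key b) →
    (l.foldl (fun acc x => PySem.List.insertBy (fun a b => decide (key a < key b)) x acc) acc).filter p =
      (l.filter p).foldl (fun acc x => PySem.List.insertBy (fun a b => decide (key a < key b)) x acc) (acc.filter p) := by
  intro l
  induction l with
  | nil => intro acc h; simp
  | cons x l ih =>
    intro acc h
    simp only [List.foldl_cons, List.filter_cons]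
    rw [ih _ (pv_insertBy_pairwise key x acc h), pv_filter_insertBy key p x acc h]
    by_cases hp : p x <;> simp [hp]

-- a stable sort commutes with filter
theorem pv_sorted_filter {α κ : Type} [LinearOrder κ] (key : α → κ) (p : α → Bool) (l : List α) :
    (PySem.List.sorted l key false).filter p = PySem.List.sorted (l.filter p) key false := by
  rw [PySem.List.sorted_eq_foldl_insertBy, PySem.List.sorted_eq_foldl_insertBy]
  simpa using pv_filter_foldl_insertBy key p l [] (by simp)

-- A's grouping dict: value at c is the sublist of items with file key c
theorem pv_getD_groupDict (l : List (List (String × String))) (c : String) :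
    (pvGroupDict l).getD c [] = l.filter (fun it => pvFp it == c) := by
  unfold pvGroupDict
  have h := PySem.Dict.getD_foldl_modify_append (l.map (fun it => (pvFp it, it))) PySem.Dict.empty c
  rw [List.foldl_map] at h
  simpa [List.filter_map, Function.comp_def, List.map_id'] using h

theorem pv_keys_groupDict (l : List (List (String × String))) :
    (pvGroupDict l).keys = PySem.Set.ofList (l.map pvFp) := by
  unfold pvGroupDict
  rw [PySem.Dict.keys_foldl_modify_key l pvFp [] (fun _ it => (fun v => v ++ [it]))]
  simp [PySem.Set.update, PySem.Set.ofList]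

theorem pv_nodup_keys_groupDict (l : List (List (String × String))) : (pvGroupDict l).keys.Nodup := by
  unfold pvGroupDict
  exact PySem.Dict.nodup_keys_foldl_modify_key l pvFp [] (fun _ it => (fun v => v ++ [it])) PySem.Dict.empty (by simp)

-- B's grouping dict (over enumerated pairs): same three facts
theorem pv_getD_pairDict (l : List (Int × List (String × String))) (c : String) :
    (l.foldl (fun out p => out.modify (pvFp p.2) [] (fun v => v ++ [p.2])) PySem.Dict.empty).getD c [] =
      (l.filter (fun p => pvFp p.2 == c)).map (fun p => p.2) := by
  have h := PySem.Dict.getD_foldl_modify_append (l.map (fun p => (pvFp p.2, p.2))) PySem.Dict.empty c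
  rw [List.foldl_map] at h
  simpa [List.filter_map, Function.comp_def] using h

theorem pv_keys_pairDict (l : List (Int × List (String × String))) :
    (l.foldl (fun out p => out.modify (pvFp p.2) [] (fun v => v ++ [p.2])) PySem.Dict.empty).keys =
      PySem.Set.ofList (l.map (fun p => pvFp p.2)) := by
  rw [PySem.Dict.keys_foldl_modify_key l (fun p => pvFp p.2) [] (fun _ p => (fun v => v ++ [p.2]))]
  simp [PySem.Set.update, PySem.Set.ofList]

theorem pv_nodup_keys_pairDict (l : List (Int × List (String × String))) :
    (l.foldl (fun out p => out.modify (pvFp p.2) [] (fun v => v ++ [p.2])) PySem.Dict.empty).keys.Nodup := by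
  exact PySem.Dict.nodup_keys_foldl_modify_key l (fun p => pvFp p.2) [] (fun _ p => (fun v => v ++ [p.2])) PySem.Dict.empty (by simp)

-- sorted2 with an Int-then-String key is sorted by the lexicographic pair
theorem pv_sorted2_eq_sorted_lex {α : Type} (xs : List α) (k1 : α → Int) (k2 : α → String) :
    PySem.List.sorted2 xs k1 k2 false = PySem.List.sorted xs (fun x => toLex (k1 x, k2 x)) false := by
  have hb : (fun a b => decide (k1 a < k1 b) || (!decide (k1 b < k1 a) && decide (k2 a < k2 b)))
      = (fun a b => decide ((toLex (k1 a, k2 a) : Lex (Int × String)) < toLex (k1 b, k2 b))) := by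
    funext a b
    by_cases h1 : k1 a < k1 b <;> by_cases h2 : k1 b < k1 a <;> by_cases h3 : k2 a < k2 b <;>
      simp [Prod.Lex.lt_iff, h1, h2, h3] <;> omega
  rw [PySem.List.sorted_eq_foldl_insertBy]
  simp only [PySem.List.sorted2, Bool.false_eq_true, if_false, ← hb]

-- set(xs) keeps first occurrences, so it is a sublist of xs
theorem pv_ofList_sublist {α : Type} [DecidableEq α] (xs : List α) : (PySem.Set.ofList xs).Sublist xs := by
  induction xs with
  | nil => simp [PySem.Set.ofList]
  | cons x xs ih =>
    rw [PySem.Set.ofList_cons]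
    refine List.Sublist.cons₂ x (List.Sublist.trans ?_ ih)
    simp [PySem.Set.discard]

-- the min-severity dict: its entry at c is the running minimum over the matching items
theorem pv_best_get? (c : String) : ∀ (l : List (List (String × String))) (d : PySem.Dict String Int),
    (l.foldl pvBestStep d).get? c =
      ((l.filter (fun it => pvFp it == c)).map pvSev).foldl
        (fun o s => some (o.elim s (fun v => min s v))) (d.get? c) := by
  intro l
  induction l with
  | nil => intro d; simp
  | cons it l ih =>
    intro d
    rw [List.foldl_cons, ih, List.filter_cons]
    by_cases hc : pvFp it = c
    · subst hc
      simp only [beq_self_eq_true, if_pos, List.map_cons, List.foldl_cons]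
      congr 1
      unfold pvBestStep
      cases hd : d.get? (pvFp it) with
      | none => simp [PySem.Dict.get?_insert_self]
      | some v =>
        by_cases hlt : pvSev it < v
        · simp [hlt, PySem.Dict.get?_insert_self, min_eq_left (le_of_lt hlt)]
        · simp [hlt, hd, min_eq_right (le_of_not_gt hlt)]
    · have hbeq : (pvFp it == c) = false := by simp [hc]
      rw [hbeq]
      simp only [Bool.false_eq_true, if_false]
      congr 1
      unfold pvBestStep
      cases hd : d.get? (pvFp it) with
      | none => simp [PySem.Dict.get?_insert_of_ne _ _ (by exact fun h => hc h.symm)]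
      | some v =>
        by_cases hlt : pvSev it < v <;>
          simp [hlt, PySem.Dict.get?_insert_of_ne _ _ (by exact fun h => hc h.symm)]

-- option-min fold over a nonempty list: its value is the minimum
theorem pv_ofold_some (sevs : List Int) : ∀ (a : Int), ∃ m,
    sevs.foldl (fun o s => some (o.elim s (fun v => min s v))) (some a) = some m ∧
      (m = a ∨ m ∈ sevs) ∧ m ≤ a ∧ ∀ v ∈ sevs, m ≤ v := by
  induction sevs with
  | nil => intro a; exact ⟨a, by simp⟩
  | cons s rest ih =>
    intro a
    obtain ⟨m, hm, hmem, hle, hall⟩ := ih (min s a)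
    refine ⟨m, by simpa using hm, ?_, le_trans hle (min_le_right _ _), ?_⟩
    · rcases hmem with rfl | h
      · rcases le_total s a with h' | h'
        · exact Or.inr (by simp [min_eq_left h'])
        · exact Or.inl (min_eq_right h')
      · exact Or.inr (List.mem_cons_of_mem _ h)
    · intro v hv
      rcases List.mem_cons.mp hv with rfl | hv
      · exact le_trans hle (min_le_left _ _)
      · exact hall v hv

theorem pv_ofold_spec (sevs : List Int) (h : sevs ≠ []) : ∃ m,
    sevs.foldl (fun o s => some (o.elim s (fun v => min s v))) none = some m ∧
      m ∈ sevs ∧ ∀ v ∈ sevs, m ≤ v := by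
  cases sevs with
  | nil => exact absurd rfl h
  | cons s rest =>
    obtain ⟨m, hm, hmem, hle, hall⟩ := pv_ofold_some rest s
    refine ⟨m, by simpa using hm, ?_, ?_⟩
    · rcases hmem with rfl | h'
      · exact List.mem_cons_self
      · exact List.mem_cons_of_mem _ h'
    · intro v hv
      rcases List.mem_cons.mp hv with rfl | hv
      · exact hle
      · exact hall v hv

-- stability: inserting by severity into a key2-strictly-sorted accumulator whose indices all precede x's
theorem pv_stable_insert (x : Int × List (String × String)) (acc : List (Int × List (String × String)))
    (hacc : acc.Pairwise (fun a b => (toLex (pvSev a.2, a.1) : Lex (Int × Int)) < toLex (pvSev b.2, b.1)))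
    (hidx : ∀ y ∈ acc, y.1 < x.1) :
    (PySem.List.insertBy (fun a b => decide (pvSev a.2 < pvSev b.2)) x acc).Pairwise
      (fun a b => (toLex (pvSev a.2, a.1) : Lex (Int × Int)) < toLex (pvSev b.2, b.1)) := by
  induction acc with
  | nil => simp [PySem.List.insertBy]
  | cons y acc ih =>
    rw [List.pairwise_cons] at hacc
    obtain ⟨hy, ht⟩ := hacc
    by_cases hlt : pvSev x.2 < pvSev y.2
    · simp only [PySem.List.insertBy, hlt, decide_true, if_true]
      refine List.Pairwise.cons ?_ (List.Pairwise.cons hy ht)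
      intro z hz
      rcases List.mem_cons.mp hz with rfl | hz
      · exact Prod.Lex.lt_iff.mpr (Or.inl hlt)
      · have := hy z hz
        rcases Prod.Lex.lt_iff.mp this with h | ⟨h, _⟩
        · exact Prod.Lex.lt_iff.mpr (Or.inl (lt_trans hlt h))
        · exact Prod.Lex.lt_iff.mpr (Or.inl (by dsimp at h ⊢; omega))
    · simp only [PySem.List.insertBy, hlt, decide_false]
      refine List.Pairwise.cons ?_ (ih ht (fun y' hy' => hidx y' (List.mem_cons_of_mem _ hy')))
      intro z hz
      rw [PySem.List.mem_insertBy] at hz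
      rcases hz with rfl | hz
      · rcases lt_or_eq_of_le (le_of_not_gt hlt) with h | h
        · exact Prod.Lex.lt_iff.mpr (Or.inl h)
        · exact Prod.Lex.lt_iff.mpr (Or.inr ⟨h, hidx y List.mem_cons_self⟩)
      · exact hy z hz

theorem pv_stable_foldl : ∀ (l acc : List (Int × List (String × String))),
    l.Pairwise (fun a b => a.1 < b.1) →
    acc.Pairwise (fun a b => (toLex (pvSev a.2, a.1) : Lex (Int × Int)) < toLex (pvSev b.2, b.1)) →
    (∀ y ∈ acc, ∀ z ∈ l, y.1 < z.1) →
    (l.foldl (fun acc x => PySem.List.insertBy (fun a b => decide (pvSev a.2 < pvSev b.2)) x acc) acc).Pairwise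
      (fun a b => (toLex (pvSev a.2, a.1) : Lex (Int × Int)) < toLex (pvSev b.2, b.1)) := by
  intro l
  induction l with
  | nil => intro acc _ h _; simpa using h
  | cons x l ih =>
    intro acc hl hacc hsep
    rw [List.pairwise_cons] at hl
    obtain ⟨hx, hlt⟩ := hl
    rw [List.foldl_cons]
    refine ih _ hlt (pv_stable_insert x acc hacc (fun y hy => hsep y hy x List.mem_cons_self)) ?_
    intro y hy z hz
    rw [PySem.List.mem_insertBy] at hy
    rcases hy with rfl | hy
    · exact hx z hz
    · exact hsep y hy z (List.mem_cons_of_mem _ hz)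

-- a stable sort by severity of an index-increasing list is strictly sorted by (severity, index)
theorem pv_stable_sorted (l : List (Int × List (String × String))) (h : l.Pairwise (fun a b => a.1 < b.1)) :
    (PySem.List.sorted l (fun p => pvSev p.2) false).Pairwise
      (fun a b => (toLex (pvSev a.2, a.1) : Lex (Int × Int)) < toLex (pvSev b.2, b.1)) := by
  rw [PySem.List.sorted_eq_foldl_insertBy]
  exact pv_stable_foldl l [] h (by simp) (by simp)

-- mapping a projection through insertBy / sorted when the key factors through the projection
theorem pv_map_insertBy {α β κ : Type} [LinearOrder κ] (f : α → β) (k : β → κ) (x : α) (ys : List α) :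
    (PySem.List.insertBy (fun a b => decide (k (f a) < k (f b))) x ys).map f =
      PySem.List.insertBy (fun a b => decide (k a < k b)) (f x) (ys.map f) := by
  induction ys with
  | nil => simp [PySem.List.insertBy]
  | cons y ys ih =>
    by_cases h : k (f x) < k (f y) <;> simp [PySem.List.insertBy, h, ih]

theorem pv_map_sorted_aux {α β κ : Type} [LinearOrder κ] (f : α → β) (k : β → κ) :
    ∀ (l acc : List α),
    (l.foldl (fun acc x => PySem.List.insertBy (fun a b => decide (k (f a) < k (f b))) x acc) acc).map f =
      (l.map f).foldl (fun acc x => PySem.List.insertBy (fun a b => decide (k a < k b)) x acc) (acc.map f) := by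
  intro l
  induction l with
  | nil => intro acc; simp
  | cons x l ih => intro acc; simp [ih, pv_map_insertBy]

theorem pv_map_sorted {α β κ : Type} [LinearOrder κ] (f : α → β) (k : β → κ) (l : List α) :
    (PySem.List.sorted l (fun a => k (f a)) false).map f = PySem.List.sorted (l.map f) k false := by
  rw [PySem.List.sorted_eq_foldl_insertBy, PySem.List.sorted_eq_foldl_insertBy]
  simpa using pv_map_sorted_aux f k l []

-- filtering the enumeration on a property of the element and dropping indices = filtering the list
theorem pv_enum_filter_map {α : Type} (q : α → Bool) : ∀ (xs : List α) (s : Int),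
    ((PySem.List.enumerate xs s).filter (fun p => q p.2)).map (fun p => p.2) = xs.filter q := by
  intro xs
  induction xs with
  | nil => intro s; simp [PySem.List.enumerate_nil]
  | cons x xs ih =>
    intro s
    rw [PySem.List.enumerate_cons]
    by_cases h : q x <;> simp [h, ih]

theorem pv_main (findings : List (List (String × String))) :
    group_findings_by_file_py findings = group_findings_by_file_py_alt findings := by
  unfold group_findings_by_file_py group_findings_by_file_py_alt
  set G := pvGroupDict findings with hG
  set groups2 := pvGroups2 findings with hg2def
  set best := pvBest findings with hbest
  set E := PySem.List.enumerate findings with hE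
  set L := PySem.List.sorted E (pvKey4 best) false with hL
  -- A-side dictionary facts
  have h_keys2 : groups2.keys = G.keys := by
    rw [hg2def]; unfold pvGroups2
    simp only [PySem.Dict.keys, List.map_map, Function.comp_def]
    rw [hG]
  have h_g2 : ∀ c ∈ G.keys, groups2.getD c [] = PySem.List.sorted (G.getD c []) pvSev false := by
    intro c hc
    have hitems := PySem.Dict.items_eq_map_keys G (pv_nodup_keys_groupDict findings) []
    have hmem : (c, G.getD c []) ∈ G.items := by
      rw [hitems]; exact List.mem_map.mpr ⟨c, hc, rfl⟩
    have hmem2 : (c, PySem.List.sorted (G.getD c []) pvSev false) ∈ groups2.items := by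
      rw [hg2def]; unfold pvGroups2
      exact List.mem_map.mpr ⟨(c, G.getD c []), hmem, rfl⟩
    exact PySem.Dict.getD_of_mem_items groups2 hmem2 (by rw [h_keys2]; exact pv_nodup_keys_groupDict findings) []
  have h_ne : ∀ c ∈ G.keys, G.getD c [] ≠ [] := by
    intro c hc
    rw [hG, pv_keys_groupDict, PySem.Set.mem_ofList, List.mem_map] at hc
    obtain ⟨it, hit, rfl⟩ := hc
    rw [hG, pv_getD_groupDict]
    intro hnil
    have : it ∈ List.filter (fun it' => pvFp it' == pvFp it) findings :=
      List.mem_filter.mpr ⟨hit, by simp⟩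
    rw [hnil] at this; exact absurd this (List.not_mem_nil)
  -- B-side group content: each group of B's dict is the severity-sorted group of A
  have h_filterE : ∀ c : String,
      (E.filter (fun p => pvFp p.2 == c)).map (fun p => p.2) = findings.filter (fun it => pvFp it == c) := by
    intro c; rw [hE]; exact pv_enum_filter_map (fun it => pvFp it == c) findings 0
  have h_content : ∀ c : String, (L.filter (fun p => pvFp p.2 == c)).map (fun p => p.2) =
      PySem.List.sorted (findings.filter (fun it => pvFp it == c)) pvSev false := by
    intro c
    have hF : L.filter (fun p => pvFp p.2 == c) =
        PySem.List.sorted (E.filter (fun p => pvFp p.2 == c)) (pvKey4 best) false := by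
      rw [hL]; exact pv_sorted_filter _ _ _
    set F := E.filter (fun p => pvFp p.2 == c) with hF2
    have hFidx : F.Pairwise (fun a b => a.1 < b.1) := by
      rw [hF2, hE]
      exact List.Pairwise.filter _ (PySem.List.pairwise_lt_enumerate findings 0)
    set S := PySem.List.sorted F (fun p => pvSev p.2) false with hS
    have hSmemfp : ∀ p ∈ S, pvFp p.2 = c := by
      intro p hp
      have h1 := (PySem.List.mem_sorted _ _ _ p).mp hp
      have h2 := List.mem_filter.mp h1
      simpa using h2.2
    have hS2 : S.Pairwise (fun a b => (toLex (pvSev a.2, a.1) : Lex (Int × Int)) < toLex (pvSev b.2, b.1)) :=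
      pv_stable_sorted F hFidx
    have hS4 : S.Pairwise (fun a b => pvKey4 best a < pvKey4 best b) := by
      refine hS2.imp_of_mem ?_
      intro a b ha hb hab
      unfold pvKey4
      rw [hSmemfp a ha, hSmemfp b hb]
      exact Prod.Lex.lt_iff.mpr (Or.inr ⟨rfl, Prod.Lex.lt_iff.mpr (Or.inr ⟨rfl, hab⟩)⟩)
    have hsf : PySem.List.sorted F (pvKey4 best) false = S :=
      PySem.List.sorted_eq_of_perm_of_pairwise_lt _ _ _ (PySem.List.sorted_perm F _ false) hS4
    rw [hF, hsf, hS]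
    calc (PySem.List.sorted F (fun p => pvSev p.2) false).map (fun p => p.2)
        = PySem.List.sorted (F.map (fun p => p.2)) pvSev false :=
          pv_map_sorted (fun p : Int × List (String × String) => p.2) pvSev F
      _ = _ := by rw [hF2, h_filterE c]
  -- B's keys are strictly sorted by (best rank, path)
  have hLle : L.Pairwise (fun a b => pvKey4 best a ≤ pvKey4 best b) := by
    rw [hL]; exact PySem.List.sorted_pairwise E (pvKey4 best)
  have hmapped : (L.map (fun p => pvFp p.2)).Pairwise
      (fun c d => (toLex (best.getD c 99, c) : Lex (Int × String)) ≤ toLex (best.getD d 99, d)) := by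
    rw [List.pairwise_map]
    refine hLle.imp ?_
    intro a b hab
    unfold pvKey4 at hab
    rcases Prod.Lex.le_iff.mp hab with h | ⟨h1, h2⟩
    · exact Prod.Lex.le_iff.mpr (Or.inl h)
    · rcases Prod.Lex.le_iff.mp h2 with h3 | ⟨h3, _⟩
      · exact Prod.Lex.le_iff.mpr (Or.inr ⟨h1, le_of_lt h3⟩)
      · exact Prod.Lex.le_iff.mpr (Or.inr ⟨h1, le_of_eq h3⟩)
  set K := PySem.Set.ofList (L.map (fun p => pvFp p.2)) with hK
  have hKnd : K.Nodup := PySem.Set.nodup_ofList _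
  have hKle : K.Pairwise
      (fun c d => (toLex (best.getD c 99, c) : Lex (Int × String)) ≤ toLex (best.getD d 99, d)) :=
    hmapped.sublist (pv_ofList_sublist _)
  have hKlt : K.Pairwise
      (fun c d => (toLex (best.getD c 99, c) : Lex (Int × String)) < toLex (best.getD d 99, d)) := by
    refine (hKle.and hKnd).imp ?_
    intro a b hab
    refine lt_of_le_of_ne hab.1 ?_
    intro he
    exact hab.2 (by have := congrArg (fun z : Lex (Int × String) => (ofLex z).2) he; simpa using this)
  -- best[fp] is the group minimum A computes
  have h_bestmin : ∀ c ∈ G.keys,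
      (PySem.List.min? ((groups2.getD c []).map pvSev) (fun x => x)).getD 99 = best.getD c 99 := by
    intro c hc
    have hgne := h_ne c hc
    rw [h_g2 c hc]
    have hgfilter : G.getD c [] = findings.filter (fun it => pvFp it == c) := by
      rw [hG]; exact pv_getD_groupDict findings c
    have hsne : PySem.List.sorted (G.getD c []) pvSev false ≠ [] :=
      fun h => hgne ((PySem.List.sorted_eq_nil_iff _ _ _).mp h)
    have hmapne : ((PySem.List.sorted (G.getD c []) pvSev false).map pvSev) ≠ [] := by
      simpa using hsne
    obtain ⟨m, hm, hmmem, hmall⟩ :=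
      pv_ofold_spec ((findings.filter (fun it => pvFp it == c)).map pvSev)
        (by rw [← hgfilter]; simpa using hgne)
    have hget : (pvBest findings).get? c = some m := by
      unfold pvBest
      rw [pv_best_get? c findings PySem.Dict.empty]
      simpa using hm
    cases hmin : PySem.List.min? ((PySem.List.sorted (G.getD c []) pvSev false).map pvSev) (fun x => x) with
    | none => exact absurd ((PySem.List.min?_eq_none_iff _ _).mp hmin) hmapne
    | some v =>
      have hv_mem : v ∈ (PySem.List.sorted (G.getD c []) pvSev false).map pvSev := PySem.List.min?_mem hmin
      have hmem_iff : ∀ x : Int, x ∈ (PySem.List.sorted (G.getD c []) pvSev false).map pvSev ↔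
          x ∈ (G.getD c []).map pvSev := by
        intro x
        constructor <;> intro hx <;> rcases List.mem_map.mp hx with ⟨y, hy, rfl⟩
        · exact List.mem_map.mpr ⟨y, (PySem.List.mem_sorted _ _ _ y).mp hy, rfl⟩
        · exact List.mem_map.mpr ⟨y, (PySem.List.mem_sorted _ _ _ y).mpr hy, rfl⟩
      have hveqm : v = m := by
        refine le_antisymm ?_ ?_
        · exact PySem.List.min?_isMin hmin m ((hmem_iff m).mpr (by rw [hgfilter]; exact hmmem))
        · exact hmall v (by rw [← hgfilter]; exact (hmem_iff v).mp hv_mem)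
      have hbd : best.getD c 99 = m := by
        rw [hbest]
        simp [PySem.Dict.getD, hget]
      simp [hveqm, hbd]
  -- B's key list is A's sorted key list
  have hKmem : ∀ c, c ∈ K ↔ c ∈ G.keys := by
    intro c
    rw [hK, PySem.Set.mem_ofList, hG, pv_keys_groupDict, PySem.Set.mem_ofList]
    have hperm : (L.map (fun p => pvFp p.2)).Perm (E.map (fun p => pvFp p.2)) := by
      rw [hL]; exact (PySem.List.sorted_perm E _ false).map _
    rw [hperm.mem_iff]
    have : E.map (fun p => pvFp p.2) = findings.map pvFp := by
      rw [hE]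
      rw [show (fun p : Int × List (String × String) => pvFp p.2) = pvFp ∘ (fun p => p.2) from rfl]
      rw [← List.map_map, PySem.List.map_snd_enumerate]
    rw [this]
  have hKperm : K.Perm G.keys :=
    (List.perm_ext_iff_of_nodup hKnd (pv_nodup_keys_groupDict _)).mpr hKmem
  have hKltA : K.Pairwise (fun a b =>
      (toLex ((PySem.List.min? ((groups2.getD a []).map pvSev) (fun x => x)).getD 99, a) : Lex (Int × String)) <
        toLex ((PySem.List.min? ((groups2.getD b []).map pvSev) (fun x => x)).getD 99, b)) := by
    refine hKlt.imp_of_mem ?_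
    intro a b ha hb hab
    rw [h_bestmin a ((hKmem a).mp ha), h_bestmin b ((hKmem b).mp hb)]
    exact hab
  have hsortkeys : PySem.List.sorted G.keys
      (fun c => (toLex ((PySem.List.min? ((groups2.getD c []).map pvSev) (fun x => x)).getD 99, c) : Lex (Int × String))) false = K :=
    PySem.List.sorted_eq_of_perm_of_pairwise_lt _ _ _ hKperm hKltA
  -- assemble
  rw [pv_sorted2_eq_sorted_lex, h_keys2]
  rw [PySem.Dict.items_eq_map_keys _ (pv_nodup_keys_pairDict L) []]
  rw [pv_keys_pairDict L]
  refine Eq.trans (congrArg (fun ks => ks.map (fun k => (k, groups2.getD k []))) hsortkeys) ?_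
  apply List.map_congr_left
  intro k hk
  have hkG : k ∈ G.keys := (hKmem k).mp hk
  have h1 : groups2.getD k [] = PySem.List.sorted (G.getD k []) pvSev false := h_g2 k hkG
  have h2 : G.getD k [] = findings.filter (fun it => pvFp it == k) := by
    rw [hG]; exact pv_getD_groupDict findings k
  rw [pv_getD_pairDict L k, h_content k, h1, h2]

-- ===== VERDICT (by name: the statement is the Claim_ definition above) =====
theorem group_findings_by_file_py_spec : Claim_equal_group_findings_by_file_py := by
  intro findings _
  unfold Spec_group_findings_by_file_py
  exact pv_main findings
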